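-- pv_equiv track=rewrite | github.com/cosmasadri/number-to-german-numeral | number_to_german_numeral/__init__.py | number_to_german_numeral
-- ===== SOURCE A (Python) =====
-- def number_to_german_numeral(number):
--     """This function is used to translate number into german numeral.
--     Example:
--         * 2 -> "zwei"
--         * 21 -> "einundzwanzig"
--         * 100 -> "einhundert"
--     Currently, the function can only translate number from 0 to 100.
--
--     Args:
--         number (int): number which is to be translated to german numeral between 0 to 100
--
--     Raises:
--         TypeError: number arg must have type of int
--         ValueError: number arg must be between 0 and 100
--
--     Returns:
--         string: german numeral of number given
--     """
--     # error handling: number argument must be int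
--     if type(number) != int:
--         raise TypeError("number must be int")
--
--     # error handling: number must be inbetween 0 and 100
--     if 0 > number or 100 < number:
--         raise ValueError("number must be int inbetween 0 and 100")
--
--     dict_number = dict(
--         [
--             ("0", "null"),
--             ("1", "eins"),
--             ("2", "zwei"),
--             ("3", "drei"),
--             ("4", "vier"),
--             ("5", "fuenf"),
--             ("6", "sechs"),
--             ("7", "sieben"),
--             ("8", "acht"),
--             ("9", "neun"),
--         ]
--     )
--
--     if number == 100:
--         return "einhundert"
--
--     else:
--         # number is converted to string and reversed
--         string_rev_number = str(number)[::-1]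
--
--         for i in range(len(string_rev_number)):
--
--             # numeral for the ones
--             # (last digit of the actual number, first digit of the reversed number)
--             if i == 0:
--                 text_number = dict_number[string_rev_number[i]]
--
--             # numeral if the number has 2 digits
--             elif i == 1:
--                 if string_rev_number[i] == "1":
--                     if string_rev_number[i - 1] == "1":
--                         text_number = "elf"
--                     elif string_rev_number[i - 1] == "2":
--                         text_number = "zwoelf"
--                     else:
--                         tens_text_number = "zehn"
--
--                         if string_rev_number[i - 1] == "0":
--                             text_number = tens_text_number
--                         elif string_rev_number[i - 1] == "6":
--                             text_number = "sech" + tens_text_number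
--                         elif string_rev_number[i - 1] == "7":
--                             text_number = "sieb" + tens_text_number
--                         else:
--                             text_number = (
--                                 dict_number[string_rev_number[i - 1]] + tens_text_number
--                             )
--                 else:
--                     if string_rev_number[i - 1] == "1":
--                         text_number = "ein"
--
--                     if string_rev_number[i] == "2":
--                         tens_text_number = "zwanzig"
--                     elif string_rev_number[i] == "3":
--                         tens_text_number = dict_number[string_rev_number[i]] + "ssig"
--                     elif string_rev_number[i] == "7":
--                         tens_text_number = "siebzig"
--                     else:
--                         tens_text_number = dict_number[string_rev_number[i]] + "zig"
--
--                     if string_rev_number[i - 1] == "0":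
--                         text_number = tens_text_number
--                     else:
--                         text_number += "und" + tens_text_number
--
--     return text_number
-- ===== SOURCE B (Python) =====
-- def number_to_german_numeral(number):
--     if type(number) != int:
--         raise TypeError("number must be int")
--     if 0 > number or 100 < number:
--         raise ValueError("number must be int inbetween 0 and 100")
--     ones_words = ["null", "eins", "zwei", "drei", "vier",
--                   "fuenf", "sechs", "sieben", "acht", "neun"]
--     if number == 100:
--         return "einhundert"
--     tens, ones = divmod(number, 10)
--     if tens == 0:
--         return ones_words[ones]
--     if tens == 1:
--         if ones == 0:
--             return "zehn"
--         if ones == 1: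
--             return "elf"
--         if ones == 2:
--             return "zwoelf"
--         if ones == 6:
--             return "sechzehn"
--         if ones == 7:
--             return "siebzehn"
--         return ones_words[ones] + "zehn"
--     if tens == 2:
--         tens_word = "zwanzig"
--     elif tens == 3:
--         tens_word = "dreissig"
--     elif tens == 7:
--         tens_word = "siebzig"
--     else:
--         tens_word = ones_words[tens] + "zig"
--     if ones == 0:
--         return tens_word
--     return ("ein" if ones == 1 else ones_words[ones]) + "und" + tens_word
-- ===== Notes on version B (the rewrite author's own statement) =====
-- stated objective: simpler
-- what changed: Replaces the reversed-digit-string loop with dict lookups by arithmetic dispatch on the tens and ones digits computed with integer division and remainder.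
import Mathlib
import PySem

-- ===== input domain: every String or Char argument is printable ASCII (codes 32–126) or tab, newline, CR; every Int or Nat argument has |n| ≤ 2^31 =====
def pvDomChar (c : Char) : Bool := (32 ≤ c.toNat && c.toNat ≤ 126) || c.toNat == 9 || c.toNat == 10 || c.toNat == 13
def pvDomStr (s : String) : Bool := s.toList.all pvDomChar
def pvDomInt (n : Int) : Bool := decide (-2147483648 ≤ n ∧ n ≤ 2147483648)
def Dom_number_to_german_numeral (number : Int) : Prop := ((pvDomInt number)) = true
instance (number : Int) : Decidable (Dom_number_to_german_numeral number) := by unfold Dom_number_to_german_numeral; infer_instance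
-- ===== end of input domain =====

-- B replaces A's reversed-digit-string loop with arithmetic dispatch on tens = n // 10 and ones = n % 10 (simpler).


-- ===== PORT A =====
-- Python's dict of one-character digit strings; one-character strings are modelled as Char.
def pvDictNumber : PySem.Dict Char String :=
  PySem.Dict.ofList
    [('0', "null"), ('1', "eins"), ('2', "zwei"), ('3', "drei"), ('4', "vier"),
     ('5', "fuenf"), ('6', "sechs"), ('7', "sieben"), ('8', "acht"), ('9', "neun")]

-- dict_number[c]: the keys looked up are always decimal digits of str(number), so the
-- KeyError branch of Python's [] is unreachable; getD "" is exact on the admitted inputs.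
def pvLookup (c : Char) : String := pvDictNumber.getD c ""

def number_to_german_numeral (number : Int) : String :=
  if number = 100 then "einhundert"
  else
    -- str(number)[::-1] as a list of characters
    let stringRevNumber : List Char := (PySem.Int.toChars number).reverse
    -- for i in range(len(...)): each iteration reassigns text_number (carried as the fold state)
    (PySem.List.pyRange 0 (stringRevNumber.length : Int) 1).foldl
      (fun textNumber i =>
        let at_ : Int → Char := fun j => ((PySem.List.pyGet? stringRevNumber j).getD ' ')
        if i = 0 then
          pvLookup (at_ i)
        else if i = 1 then
          if at_ i = '1' then
            if at_ (i - 1) = '1' then "elf"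
            else if at_ (i - 1) = '2' then "zwoelf"
            else
              let tensTextNumber := "zehn"
              if at_ (i - 1) = '0' then tensTextNumber
              else if at_ (i - 1) = '6' then "sech" ++ tensTextNumber
              else if at_ (i - 1) = '7' then "sieb" ++ tensTextNumber
              else pvLookup (at_ (i - 1)) ++ tensTextNumber
          else
            let textNumber := if at_ (i - 1) = '1' then "ein" else textNumber
            let tensTextNumber :=
              if at_ i = '2' then "zwanzig"
              else if at_ i = '3' then pvLookup (at_ i) ++ "ssig"
              else if at_ i = '7' then "siebzig"
              else pvLookup (at_ i) ++ "zig"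
            if at_ (i - 1) = '0' then tensTextNumber
            else textNumber ++ "und" ++ tensTextNumber
        else textNumber)
      ""

-- ===== PORT B =====
def pvOnesWords : List String :=
  ["null", "eins", "zwei", "drei", "vier", "fuenf", "sechs", "sieben", "acht", "neun"]

def number_to_german_numeral_alt (number : Int) : String :=
  if number = 100 then "einhundert"
  else
    let tens := PySem.Int.floordiv number 10
    let ones := PySem.Int.mod number 10
    let onesWord := (PySem.List.pyGet? pvOnesWords ones).getD ""
    if tens = 0 then onesWord
    else if tens = 1 then
      if ones = 0 then "zehn"
      else if ones = 1 then "elf"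
      else if ones = 2 then "zwoelf"
      else if ones = 6 then "sechzehn"
      else if ones = 7 then "siebzehn"
      else onesWord ++ "zehn"
    else
      let tensWord :=
        if tens = 2 then "zwanzig"
        else if tens = 3 then "dreissig"
        else if tens = 7 then "siebzig"
        else ((PySem.List.pyGet? pvOnesWords tens).getD "") ++ "zig"
      if ones = 0 then tensWord
      else (if ones = 1 then "ein" else onesWord) ++ "und" ++ tensWord

-- ===== PRECONDITION & SPEC =====
-- Python A raises ValueError outside 0..100 (TypeError is a non-int type, outside this signature).
def Pre_number_to_german_numeral (number : Int) : Prop := 0 ≤ number ∧ number ≤ 100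
instance (number : Int) : Decidable (Pre_number_to_german_numeral number) := by
  unfold Pre_number_to_german_numeral; infer_instance

def pvWitness_number_to_german_numeral : Int := 21

def Spec_number_to_german_numeral (number : Int) (out : String) : Prop :=
  out = number_to_german_numeral_alt number
instance (number : Int) (out : String) : Decidable (Spec_number_to_german_numeral number out) := by
  unfold Spec_number_to_german_numeral; infer_instance

-- ===== CLAIM (what is proved, stated in full; the proofs are below) =====
def Claim_equal_number_to_german_numeral : Prop :=
  ∀ (number : Int), Dom_number_to_german_numeral number →
    Pre_number_to_german_numeral number →
    Spec_number_to_german_numeral number (number_to_german_numeral number)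

-- ===== LEMMAS AND PROOFS =====

-- ===== VERDICT (by name: the statement is the Claim_ definition above) =====
theorem number_to_german_numeral_spec : Claim_equal_number_to_german_numeral := by
  intro number _ hpre
  obtain ⟨h0, h1⟩ := hpre
  unfold Spec_number_to_german_numeral
  interval_cases number <;> rfl
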